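-- pv_equiv track=rewrite | github.com/VitaliyTomchyk/shipslist | ships_list/additional_functions/booking/additional_functions.py | reader_of_ports
-- ===== SOURCE A (Python) =====
-- def reader_of_ports(ports):
--     load_ports, discharge_ports = list(
--         filter(
--             lambda x: x[1] == 'Load port', ports)), list(
--         filter(
--             lambda x: x[1] == 'Discharge port', ports))
--
--     load_ports = [x[0] for x in load_ports]
--     discharge_ports = [x[0] for x in discharge_ports]
--
--     return load_ports, discharge_ports
-- ===== SOURCE B (Python) =====
-- def reader_of_ports(ports):
--     load_ports = []
--     discharge_ports = []
--     for x in ports: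
--         if x[1] == 'Load port':
--             load_ports.append(x[0])
--         elif x[1] == 'Discharge port':
--             discharge_ports.append(x[0])
--     return load_ports, discharge_ports
-- ===== Notes on version B (the rewrite author's own statement) =====
-- stated objective: simpler
-- what changed: Replaces two sequential filter passes followed by two projection comprehensions with a single accumulating loop that classifies each port once and appends its name to the proper list.
import Mathlib
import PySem

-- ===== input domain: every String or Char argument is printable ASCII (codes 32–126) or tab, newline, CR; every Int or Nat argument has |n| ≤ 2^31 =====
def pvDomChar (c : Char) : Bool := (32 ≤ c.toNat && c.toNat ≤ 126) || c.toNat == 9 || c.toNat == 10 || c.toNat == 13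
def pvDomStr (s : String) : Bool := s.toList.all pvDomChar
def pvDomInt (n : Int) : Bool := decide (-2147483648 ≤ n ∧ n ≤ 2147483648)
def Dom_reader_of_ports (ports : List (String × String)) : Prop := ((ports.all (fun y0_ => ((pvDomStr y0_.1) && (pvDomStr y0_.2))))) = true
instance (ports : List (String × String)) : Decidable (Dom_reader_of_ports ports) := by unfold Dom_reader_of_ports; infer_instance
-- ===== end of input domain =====

-- B replaces A's two filter passes plus two projection comprehensions with one
-- accumulating loop that classifies each port once (objective: simpler).


-- ===== PORT A =====
def reader_of_ports (ports : List (String × String)) : List String × List String :=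
  let load_ports := ports.filter (fun x => x.2 == "Load port")
  let discharge_ports := ports.filter (fun x => x.2 == "Discharge port")
  (load_ports.map (fun x => x.1), discharge_ports.map (fun x => x.1))

-- ===== PORT B =====
def reader_of_ports_alt (ports : List (String × String)) : List String × List String :=
  ports.foldl (fun acc x =>
    if x.2 == "Load port" then (acc.1 ++ [x.1], acc.2)
    else if x.2 == "Discharge port" then (acc.1, acc.2 ++ [x.1])
    else acc) ([], [])

-- ===== PRECONDITION & SPEC =====
def Spec_reader_of_ports (ports : List (String × String)) (out : List String × List String) : Prop := out = reader_of_ports_alt ports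
instance (ports : List (String × String)) (out : List String × List String) : Decidable (Spec_reader_of_ports ports out) := by unfold Spec_reader_of_ports; infer_instance

-- ===== CLAIM =====
def Claim_equal_reader_of_ports : Prop := ∀ (ports : List (String × String)), Dom_reader_of_ports ports → Spec_reader_of_ports ports (reader_of_ports ports)

-- ===== LEMMAS AND PROOFS =====
theorem reader_of_ports_foldl_acc (ports : List (String × String)) (L D : List String) :
    ports.foldl (fun acc x =>
      if x.2 == "Load port" then (acc.1 ++ [x.1], acc.2)
      else if x.2 == "Discharge port" then (acc.1, acc.2 ++ [x.1])
      else acc) (L, D)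
    = (L ++ (ports.filter (fun x => x.2 == "Load port")).map (fun x => x.1),
       D ++ (ports.filter (fun x => x.2 == "Discharge port")).map (fun x => x.1)) := by
  induction ports generalizing L D with
  | nil => simp
  | cons h t ih =>
    simp only [List.foldl_cons, List.filter_cons]
    by_cases hl : h.2 = "Load port"
    · rw [if_pos (by simp [hl] : (h.2 == "Load port") = true), ih]
      simp [hl]
    · by_cases hd : h.2 = "Discharge port"
      · rw [if_neg (by simp [hl] : ¬ (h.2 == "Load port") = true),
            if_pos (by simp [hd] : (h.2 == "Discharge port") = true), ih]
        simp [hl, hd]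
      · rw [if_neg (by simp [hl] : ¬ (h.2 == "Load port") = true),
            if_neg (by simp [hd] : ¬ (h.2 == "Discharge port") = true), ih]
        simp [hl, hd]

-- ===== VERDICT =====
theorem reader_of_ports_spec : Claim_equal_reader_of_ports := by
  intro ports _
  unfold Spec_reader_of_ports reader_of_ports reader_of_ports_alt
  rw [reader_of_ports_foldl_acc]
  simp
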